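-- pv_equiv track=rewrite | github.com/gramjos/obsidianvault_2_web | build.py | generate_page_title
-- ===== SOURCE A (Python) =====
-- def generate_page_title(url_path):
--     """Generate a page title from URL path"""
--     if url_path == "/":
--         return "Home"
--
--     # Remove leading slash and trailing .html
--     clean_path = url_path.strip("/")
--     if clean_path.endswith(".html"):
--         clean_path = clean_path[:-5]
--
--     # Replace slashes with " > " for breadcrumb-style titles
--     if "/" in clean_path:
--         parts = clean_path.split("/")
--         if parts[-1] == "README":
--             parts = parts[:-1]  # Remove README from the end
--         return " > ".join(part.replace("_", " ").title() for part in parts)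
--     else:
--         if clean_path == "README":
--             return "Home"
--         return clean_path.replace("_", " ").title()
-- ===== SOURCE B (Python) =====
-- def generate_page_title(url_path):
--     """Generate a page title from URL path"""
--     if url_path == "/":
--         return "Home"
--     s = url_path.strip("/")
--     if s.endswith(".html"):
--         s = s[:-5]
--     if s == "README":
--         return "Home"
--     if s.endswith("/README"):
--         s = s[:-7]
--     # One character-level scan: a slash emits the breadcrumb separator,
--     # an underscore a space; letters are title-cased by tracking whether
--     # the previous source character was alphabetic.
--     out = []
--     prev_alpha = False
--     for c in s:
--         if c == "/":
--             out.append(" > ")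
--             prev_alpha = False
--         elif c == "_":
--             out.append(" ")
--             prev_alpha = False
--         elif c.isalpha():
--             out.append(c.lower() if prev_alpha else c.upper())
--             prev_alpha = True
--         else:
--             out.append(c)
--             prev_alpha = False
--     return "".join(out)
-- ===== Notes on version B (the rewrite author's own statement) =====
-- stated objective: alternative
-- what changed: A's split-into-parts / per-part replace+title / join pipeline is replaced by one character-level state machine over the cleaned string (after a direct suffix check drops a trailing README segment): a slash emits the breadcrumb separator, an underscore emits a space, and letters are cased by tracking whether the previous character was alphabetic, so no part list, replace, title or join is built.
import Mathlib
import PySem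

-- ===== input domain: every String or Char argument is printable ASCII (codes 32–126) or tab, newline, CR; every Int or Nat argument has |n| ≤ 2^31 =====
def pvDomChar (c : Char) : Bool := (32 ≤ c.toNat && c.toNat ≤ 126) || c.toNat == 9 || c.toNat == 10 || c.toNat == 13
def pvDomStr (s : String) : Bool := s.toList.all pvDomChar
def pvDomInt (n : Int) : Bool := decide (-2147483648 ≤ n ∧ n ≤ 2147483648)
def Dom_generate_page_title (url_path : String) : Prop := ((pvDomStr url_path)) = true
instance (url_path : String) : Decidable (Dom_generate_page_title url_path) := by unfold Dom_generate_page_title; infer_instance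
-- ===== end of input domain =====

-- B replaces A's split-parts / per-part replace+title / join pipeline by one character-level state
-- machine over the cleaned string (a direct suffix check drops a trailing README segment first);
-- objective: alternative (different algorithm, same cost).

-- str.title(), exact on the ASCII domain: an alphabetic char is uppercased after a
-- non-alphabetic position (or the start) and lowercased after an alphabetic one.
def pyTitleGo : Bool → List Char → List Char
  | _, [] => []
  | prev, c :: rest =>
    if PySem.Chars.isalpha c then
      (if prev then PySem.Chars.lowerChar c else PySem.Chars.upperChar c) :: pyTitleGo true rest
    else
      c :: pyTitleGo false rest

def pyTitle (s : String) : String := String.ofList (pyTitleGo false s.toList)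

-- ===== PORT A =====
def generate_page_title (url_path : String) : String :=
  if url_path == "/" then "Home"
  else
    let clean_path := PySem.Str.stripChars url_path "/"
    let clean_path := if PySem.Str.endswith clean_path ".html" then PySem.Str.slice clean_path none (some (-5)) else clean_path
    if PySem.Str.isIn "/" clean_path then
      let parts := (PySem.Chars.splitOn clean_path.toList "/".toList).map String.ofList
      let parts := if PySem.List.pyGet? parts (-1) == some "README" then PySem.List.slice parts none (some (-1)) else parts
      PySem.Str.join " > " (parts.map (fun part => pyTitle (PySem.Str.replace part "_" " ")))
    else
      if clean_path == "README" then "Home"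
      else pyTitle (PySem.Str.replace clean_path "_" " ")

-- ===== PORT B =====
-- one pass over the characters: a slash emits the breadcrumb separator, an underscore a
-- space, and letters are title-cased by tracking whether the previous char was alphabetic
def bScan : Bool → List Char → List Char
  | _, [] => []
  | prev, c :: rest =>
    if c = '/' then ' ' :: '>' :: ' ' :: bScan false rest
    else if c = '_' then ' ' :: bScan false rest
    else if PySem.Chars.isalpha c then
      (if prev then PySem.Chars.lowerChar c else PySem.Chars.upperChar c) :: bScan true rest
    else c :: bScan false rest

def generate_page_title_alt (url_path : String) : String :=
  if url_path == "/" then "Home"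
  else
    let s := PySem.Str.stripChars url_path "/"
    let s := if PySem.Str.endswith s ".html" then PySem.Str.slice s none (some (-5)) else s
    if s == "README" then "Home"
    else
      let s := if PySem.Str.endswith s "/README" then PySem.Str.slice s none (some (-7)) else s
      String.ofList (bScan false s.toList)

-- ===== PRECONDITION & SPEC =====
def Spec_generate_page_title (url_path : String) (out : String) : Prop := out = generate_page_title_alt url_path
instance (url_path : String) (out : String) : Decidable (Spec_generate_page_title url_path out) := by unfold Spec_generate_page_title; infer_instance

-- ===== CLAIM (what is proved, stated in full; the proofs are below) =====
def Claim_equal_generate_page_title : Prop := ∀ (url_path : String), Dom_generate_page_title url_path → Spec_generate_page_title url_path (generate_page_title url_path)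

-- ===== LEMMAS AND PROOFS =====

-- single replaced character, and splitting on '/' as a structural recursion
def replChar (c : Char) : Char := if c = '_' then ' ' else c

def mySplit : List Char → List (List Char)
  | [] => [[]]
  | c :: rest =>
    if c = '/' then [] :: mySplit rest
    else
      match mySplit rest with
      | [] => [[c]]
      | s :: ss => (c :: s) :: ss

-- what B's scan produces, expressed over the parts of the path
def joinTitled : Bool → List (List Char) → List Char
  | _, [] => []
  | prev, s :: ss =>
      pyTitleGo prev (s.map replChar) ++
        ss.flatMap (fun t => ' ' :: '>' :: ' ' :: pyTitleGo false (t.map replChar))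

theorem mySplit_ne_nil (l : List Char) : mySplit l ≠ [] := by
  cases l with
  | nil => simp [mySplit]
  | cons c rest =>
    simp only [mySplit]
    split
    · simp
    · split <;> simp

theorem mySplit_slash (rest : List Char) : mySplit ('/' :: rest) = [] :: mySplit rest := rfl

theorem mySplit_cons (c : Char) (rest : List Char) (s : List Char) (ss : List (List Char))
    (hc : ¬ c = '/') (hm : mySplit rest = s :: ss) :
    mySplit (c :: rest) = (c :: s) :: ss := by
  simp only [mySplit, if_neg hc, hm]

theorem splitOn_go_char : ∀ (f : Nat) (l cur : List Char) (acc : List (List Char)),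
    l.length < f →
    PySem.Chars.splitOn.go ['/'] f l cur acc =
      acc.reverse ++ (match mySplit l with
        | [] => [cur.reverse]
        | s :: ss => (cur.reverse ++ s) :: ss) := by
  intro f
  induction f with
  | zero => intro l cur acc h; exact absurd h (Nat.not_lt_zero _)
  | succ f ih =>
    intro l cur acc h
    cases l with
    | nil => simp [PySem.Chars.splitOn.go, mySplit]
    | cons c rest =>
      rw [PySem.Chars.splitOn.go]
      split
      next hpre =>
        have hc : c = '/' := by
          simp [List.isPrefixOf] at hpre
          exact hpre.symm
        subst hc
        have hdrop : List.drop (['/'] : List Char).length ('/' :: rest) = rest := rfl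
        rw [hdrop, ih rest [] (cur.reverse :: acc) (by simp at h ⊢; omega), mySplit_slash]
        rcases hm : mySplit rest with _ | ⟨s, ss⟩
        · exact absurd hm (mySplit_ne_nil rest)
        · simp
      next hpre =>
        have hc : ¬ c = '/' := by
          intro hc; subst hc
          exact hpre (by simp [List.isPrefixOf])
        rw [ih rest (c :: cur) acc (by simp at h ⊢; omega)]
        rcases hm : mySplit rest with _ | ⟨s, ss⟩
        · exact absurd hm (mySplit_ne_nil rest)
        · rw [mySplit_cons c rest s ss hc hm]
          simp

theorem splitOn_slash (l : List Char) :
    PySem.Chars.splitOn l "/".toList = mySplit l := by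
  have h : "/".toList = ['/'] := rfl
  rw [h, PySem.Chars.splitOn, splitOn_go_char (l.length + 1) l [] [] (by omega)]
  rcases hm : mySplit l with _ | ⟨s, ss⟩
  · exact absurd hm (mySplit_ne_nil l)
  · simp

theorem replace_go_char : ∀ (f : Nat) (l acc : List Char),
    l.length ≤ f →
    PySem.Chars.replace.go ['_'] [' '] f l acc = acc.reverse ++ l.map replChar := by
  intro f
  induction f with
  | zero =>
    intro l acc h
    have hl : l = [] := by
      cases l with
      | nil => rfl
      | cons c t => simp at h
    subst hl
    simp [PySem.Chars.replace.go]
  | succ f ih =>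
    intro l acc h
    cases l with
    | nil => simp [PySem.Chars.replace.go]
    | cons c t =>
      rw [PySem.Chars.replace.go]
      split
      next hpre =>
        have hc : c = '_' := by
          simp [List.isPrefixOf] at hpre
          exact hpre.symm
        subst hc
        have hdrop : List.drop (['_'] : List Char).length ('_' :: t) = t := rfl
        rw [hdrop, ih t ([' '].reverse ++ acc) (by simp at h ⊢; omega)]
        simp [replChar]
      next hpre =>
        have hc : ¬ c = '_' := by
          intro hc; subst hc
          exact hpre (by simp [List.isPrefixOf])
        rw [ih t (c :: acc) (by simp at h ⊢; omega)]
        simp [replChar, hc]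

theorem replace_underscore (l : List Char) :
    PySem.Chars.replace l "_".toList " ".toList = l.map replChar := by
  have h1 : "_".toList = ['_'] := rfl
  have h2 : " ".toList = [' '] := rfl
  rw [h1, h2, PySem.Chars.replace]
  simp only [List.isEmpty_iff, reduceCtorEq, if_false]
  simpa using replace_go_char l.length l [] (le_refl _)

theorem bScan_eq (l : List Char) : ∀ prev, bScan prev l = joinTitled prev (mySplit l) := by
  induction l with
  | nil => intro prev; simp [bScan, mySplit, joinTitled, pyTitleGo]
  | cons c rest ih =>
    intro prev
    rcases hm : mySplit rest with _ | ⟨s, ss⟩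
    · exact absurd hm (mySplit_ne_nil rest)
    by_cases hc : c = '/'
    · subst hc
      have h1 : bScan prev ('/' :: rest) = ' ' :: '>' :: ' ' :: bScan false rest := rfl
      rw [h1, ih false, mySplit_slash, hm]
      simp [joinTitled, pyTitleGo]
    by_cases hu : c = '_'
    · subst hu
      have h1 : bScan prev ('_' :: rest) = ' ' :: bScan false rest := rfl
      have h3 : ∀ x, pyTitleGo prev (' ' :: x) = ' ' :: pyTitleGo false x := fun x => rfl
      rw [h1, ih false, hm, mySplit_cons '_' rest s ss (by decide) hm]
      simp only [joinTitled, List.map_cons, show replChar '_' = ' ' from rfl, h3]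
      simp
    by_cases ha : PySem.Chars.isalpha c = true
    · have hrc : replChar c = c := by simp [replChar, hu]
      simp only [bScan, if_neg hc, if_neg hu, if_pos ha]
      rw [ih true, hm, mySplit_cons c rest s ss hc hm]
      simp only [joinTitled, List.map_cons, hrc, pyTitleGo, if_pos ha]
      simp
    · have hrc : replChar c = c := by simp [replChar, hu]
      simp only [bScan, if_neg hc, if_neg hu, if_neg ha]
      rw [ih false, hm, mySplit_cons c rest s ss hc hm]
      simp only [joinTitled, List.map_cons, hrc, pyTitleGo, if_neg ha]
      simp

theorem mySplit_append (x y : List Char) :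
    mySplit (x ++ '/' :: y) = mySplit x ++ mySplit y := by
  induction x with
  | nil => simp [mySplit_slash, mySplit]
  | cons c x' ih =>
    by_cases hc : c = '/'
    · subst hc
      rw [List.cons_append, mySplit_slash, mySplit_slash, ih, List.cons_append]
    · rcases hm : mySplit x' with _ | ⟨s, ss⟩
      · exact absurd hm (mySplit_ne_nil x')
      · have h2 : mySplit (x' ++ '/' :: y) = s :: (ss ++ mySplit y) := by
          rw [ih, hm]; rfl
        rw [List.cons_append, mySplit_cons c _ s (ss ++ mySplit y) hc h2,
          mySplit_cons c x' s ss hc hm]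
        simp

theorem mySplit_single : ∀ (l r : List Char), mySplit l = [r] → l = r := by
  intro l
  induction l with
  | nil =>
    intro r h
    simp [mySplit] at h
    exact h.symm
  | cons c rest ih =>
    intro r h
    by_cases hc : c = '/'
    · subst hc
      rw [mySplit_slash] at h
      exact absurd (List.cons.inj h).2 (mySplit_ne_nil rest)
    · rcases hm : mySplit rest with _ | ⟨s, ss⟩
      · exact absurd hm (mySplit_ne_nil rest)
      · rw [mySplit_cons c rest s ss hc hm] at h
        obtain ⟨h1, h2⟩ := List.cons.inj h
        subst h2
        rw [← h1, ih s (by rw [hm])]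

theorem mySplit_no_slash : ∀ (l : List Char), '/' ∉ l → mySplit l = [l] := by
  intro l
  induction l with
  | nil => intro _; rfl
  | cons c rest ih =>
    intro h
    have hc : ¬ c = '/' := fun hc => h (by rw [hc]; exact List.mem_cons_self ..)
    have hrest : '/' ∉ rest := fun hm => h (List.mem_cons_of_mem _ hm)
    rw [mySplit_cons c rest rest [] hc (ih hrest)]

theorem mySplit_len2 : ∀ (l : List Char), '/' ∈ l → 1 < (mySplit l).length := by
  intro l
  induction l with
  | nil => intro h; simp at h
  | cons c rest ih =>
    intro h
    by_cases hc : c = '/'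
    · subst hc
      rw [mySplit_slash, List.length_cons]
      have : 0 < (mySplit rest).length := List.length_pos_of_ne_nil (mySplit_ne_nil rest)
      omega
    · have hrest : '/' ∈ rest := by
        rcases List.mem_cons.mp h with h1 | h1
        · exact absurd h1.symm hc
        · exact h1
      rcases hm : mySplit rest with _ | ⟨s, ss⟩
      · exact absurd hm (mySplit_ne_nil rest)
      · have hlen := ih hrest
        rw [hm, List.length_cons] at hlen
        rw [mySplit_cons c rest s ss hc hm, List.length_cons]
        omega

theorem mySplit_last_suffix : ∀ (l r : List Char), (mySplit l).getLast? = some r →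
    1 < (mySplit l).length → ('/' :: r) <:+ l := by
  intro l
  induction l with
  | nil => intro r h hlen; simp [mySplit] at hlen
  | cons c rest ih =>
    intro r h hlen
    by_cases hc : c = '/'
    · subst hc
      rcases hm : mySplit rest with _ | ⟨s, ss⟩
      · exact absurd hm (mySplit_ne_nil rest)
      rw [mySplit_slash, hm, List.getLast?_cons_cons] at h
      by_cases h1 : 1 < (s :: ss).length
      · have := ih r (by rw [hm]; exact h) (by rw [hm]; exact h1)
        exact this.trans (List.suffix_cons _ _)
      · have hss : ss = [] := by
          cases ss with
          | nil => rfl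
          | cons a b => simp at h1
        subst hss
        simp only [List.getLast?_singleton, Option.some.injEq] at h
        have hr : rest = s := mySplit_single rest s (by rw [hm])
        rw [← h, hr]
    · rcases hm : mySplit rest with _ | ⟨s, ss⟩
      · exact absurd hm (mySplit_ne_nil rest)
      rw [mySplit_cons c rest s ss hc hm] at h hlen
      have hss : ss ≠ [] := by
        intro hs; subst hs; simp at hlen
      rcases ss with _ | ⟨u, us⟩
      · exact absurd rfl hss
      rw [List.getLast?_cons_cons] at h
      have := ih r (by rw [hm, List.getLast?_cons_cons]; exact h)
        (by rw [hm]; simp)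
      exact this.trans (List.suffix_cons _ _)

theorem pyGet?_neg_one {α : Type} (xs : List α) :
    PySem.List.pyGet? xs (-1) = xs.getLast? := by
  cases xs with
  | nil => rfl
  | cons a t =>
    have h1 : PySem.List.pyIdx? (a :: t).length (-1) = some ((a :: t).length - 1) := by
      simp only [PySem.List.pyIdx?]
      rw [if_neg (by omega), if_pos (by simp)]
      norm_num
    simp only [PySem.List.pyGet?, h1, Option.bind_some]
    rw [List.getLast?_eq_getElem?]

theorem intercalate_cons_cons' {α : Type} (sep a b : List α) (l : List (List α)) :
    sep.intercalate (a :: b :: l) = a ++ sep ++ sep.intercalate (b :: l) := by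
  simp [List.intercalate, List.append_assoc]

theorem intercalate_map_cons {α β : Type} (sep : List α) (g : β → List α) :
    ∀ (ss : List β) (s : β),
      sep.intercalate ((s :: ss).map g) = g s ++ ss.flatMap (fun t => sep ++ g t) := by
  intro ss
  induction ss with
  | nil => intro s; simp [List.intercalate]
  | cons t ts ih =>
    intro s
    rw [show ((s :: t :: ts).map g) = g s :: g t :: ts.map g from rfl,
      intercalate_cons_cons',
      show (g t :: ts.map g) = (t :: ts).map g from rfl, ih t]
    simp [List.append_assoc]

theorem joinTitled_eq_join (qs : List (List Char)) (hne : qs ≠ []) :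
    PySem.Str.join " > " ((qs.map String.ofList).map
        (fun part => pyTitle (PySem.Str.replace part "_" " "))) =
      String.ofList (joinTitled false qs) := by
  apply String.toList_inj.mp
  rw [String.toList_ofList]
  have hmap : ((qs.map String.ofList).map
      (fun part => pyTitle (PySem.Str.replace part "_" " "))).map String.toList =
      qs.map (fun q => pyTitleGo false (q.map replChar)) := by
    simp only [List.map_map]
    apply List.map_congr_left
    intro q _
    simp only [Function.comp_apply, pyTitle, String.toList_ofList]
    congr 1
    rw [show (PySem.Str.replace (String.ofList q) "_" " ").toList =
      PySem.Chars.replace (String.ofList q).toList "_".toList " ".toList from by simp,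
      String.toList_ofList, replace_underscore]
  rcases qs with _ | ⟨s, ss⟩
  · exact absurd rfl hne
  · rw [show (PySem.Str.join " > " (((s :: ss).map String.ofList).map
        (fun part => pyTitle (PySem.Str.replace part "_" " ")))).toList =
      PySem.Chars.join " > ".toList ((((s :: ss).map String.ofList).map
        (fun part => pyTitle (PySem.Str.replace part "_" " "))).map String.toList) from by simp,
      hmap, PySem.Chars.join,
      intercalate_map_cons " > ".toList (fun q => pyTitleGo false (q.map replChar)) ss s]
    simp [joinTitled, show (" > " : String).toList = [' ', '>', ' '] from rfl]

theorem slash_mem_of_isIn (p : String) (h : PySem.Str.isIn "/" p = true) :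
    '/' ∈ p.toList := by
  obtain ⟨s, t, hst⟩ := (PySem.Str.isIn_iff_infix "/" p).mp h
  rw [← hst]
  simp [show ("/" : String).toList = ['/'] from rfl]

theorem isIn_of_slash_mem (p : String) (h : '/' ∈ p.toList) :
    PySem.Str.isIn "/" p = true := by
  apply (PySem.Str.isIn_iff_infix "/" p).mpr
  obtain ⟨s, t, hst⟩ := List.mem_iff_append.mp h
  exact ⟨s, t, by rw [hst]; simp [show ("/" : String).toList = ['/'] from rfl]⟩

theorem not_endswith_readme (p : String)
    (hlast : ¬ (mySplit p.toList).getLast? = some ("README".toList)) :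
    ¬ (PySem.Str.endswith p "/README" = true) := by
  intro hend
  rw [PySem.Str.endswith_eq] at hend
  obtain ⟨q, hq⟩ := (PySem.Chars.endswith_iff p.toList "/README".toList).mp hend
  apply hlast
  rw [show ("/README" : String).toList = '/' :: "README".toList from rfl] at hq
  rw [← hq, mySplit_append, mySplit_no_slash ("README".toList) (by decide)]
  exact List.getLast?_concat

theorem tail_eq (p : String) :
    (if PySem.Str.isIn "/" p then
      PySem.Str.join " > "
        ((if PySem.List.pyGet? ((PySem.Chars.splitOn p.toList "/".toList).map String.ofList) (-1) == some "README"
          then PySem.List.slice ((PySem.Chars.splitOn p.toList "/".toList).map String.ofList) none (some (-1))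
          else (PySem.Chars.splitOn p.toList "/".toList).map String.ofList).map
          (fun part => pyTitle (PySem.Str.replace part "_" " ")))
    else if p == "README" then "Home"
    else pyTitle (PySem.Str.replace p "_" " "))
    =
    (if p == "README" then "Home"
    else String.ofList (bScan false
      (if PySem.Str.endswith p "/README" then PySem.Str.slice p none (some (-7)) else p).toList)) := by
  by_cases hR : p = "README"
  · subst hR; decide
  have hRb : ¬ ((p == "README") = true) := by simpa using hR
  by_cases hin : PySem.Str.isIn "/" p = true
  · rw [if_pos hin, splitOn_slash, if_neg hRb]
    have hget : PySem.List.pyGet? ((mySplit p.toList).map String.ofList) (-1) =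
        ((mySplit p.toList).getLast?).map String.ofList := by
      rw [pyGet?_neg_one, List.getLast?_map]
    by_cases hlast : (mySplit p.toList).getLast? = some ("README".toList)
    · have htest : (PySem.List.pyGet? ((mySplit p.toList).map String.ofList) (-1)
          == some "README") = true := by
        rw [hget, hlast]
        simp
      rw [if_pos htest]
      have hmem := slash_mem_of_isIn p hin
      have hlen := mySplit_len2 p.toList hmem
      obtain ⟨q, hq⟩ := mySplit_last_suffix p.toList _ hlast hlen
      have happ : mySplit p.toList = mySplit q ++ ["README".toList] := by
        rw [← hq, mySplit_append, mySplit_no_slash ("README".toList) (by decide)]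
      have hend : PySem.Str.endswith p "/README" = true := by
        rw [PySem.Str.endswith_eq]
        apply (PySem.Chars.endswith_iff p.toList "/README".toList).mpr
        exact ⟨q, hq⟩
      rw [if_pos hend]
      have hslice : (PySem.Str.slice p none (some (-7))).toList = q := by
        rw [show (PySem.Str.slice p none (some (-7))).toList =
          PySem.List.slice p.toList none (some (-7)) from by simp,
          PySem.List.slice_to_neg_ofNat p.toList 7 (by norm_num)]
        rw [← hq]
        have hlen7 : (q ++ '/' :: "README".toList).length - 7 = q.length := by
          simp [List.length_append]
        rw [hlen7]
        exact List.take_left' rfl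
      rw [PySem.List.slice_to_neg_one, ← List.map_dropLast, happ,
        List.dropLast_concat, hslice,
        joinTitled_eq_join (mySplit q) (mySplit_ne_nil q), bScan_eq]
    · have htest : ¬ ((PySem.List.pyGet? ((mySplit p.toList).map String.ofList) (-1)
          == some "README") = true) := by
        rw [hget]
        rcases hgl : (mySplit p.toList).getLast? with _ | r
        · simp
        · have hr : ¬ String.ofList r = "README" := by
            intro hof
            apply hlast
            rw [hgl]
            have := congrArg String.toList hof
            simp only [String.toList_ofList] at this
            rw [this]
          simp [hr]
      rw [if_neg htest, if_neg (not_endswith_readme p hlast),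
        joinTitled_eq_join (mySplit p.toList) (mySplit_ne_nil _), bScan_eq]
  · rw [if_neg hin, if_neg hRb, if_neg hRb]
    have hmem : '/' ∉ p.toList := fun hm => hin (isIn_of_slash_mem p hm)
    have hlast : ¬ (mySplit p.toList).getLast? = some ("README".toList) := by
      rw [mySplit_no_slash p.toList hmem]
      intro h
      simp only [List.getLast?_singleton, Option.some.injEq] at h
      apply hR
      have := congrArg String.ofList h
      rwa [String.ofList_toList, String.ofList_toList] at this
    rw [if_neg (not_endswith_readme p hlast), bScan_eq, mySplit_no_slash p.toList hmem]
    simp only [joinTitled, List.flatMap_nil, List.append_nil]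
    rw [pyTitle]
    congr 2
    rw [show (PySem.Str.replace p "_" " ").toList =
      PySem.Chars.replace p.toList "_".toList " ".toList from by simp,
      replace_underscore]

theorem ab_eq (u : String) : generate_page_title u = generate_page_title_alt u := by
  unfold generate_page_title generate_page_title_alt
  split
  · rfl
  · exact tail_eq _

-- ===== VERDICT (by name: the statement is the Claim_ definition above) =====
theorem generate_page_title_spec : Claim_equal_generate_page_title :=
  fun u _ => ab_eq u
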